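-- pv_equiv track=rewrite | github.com/DebTheDevV/PROJECT-EXHIBITION-1 | main.py | custom_tokenize
-- ===== SOURCE A (Python) =====
-- def custom_tokenize(text: str, n_grams: int = 2):
--     text = (text or "").lower()
--     punctuation = ".,!?;:'\"()[]{}–—*/\\&%$#@+=<>~`|^_—–"
--     for ch in punctuation:
--         text = text.replace(ch, ' ')
--     tokens = [t for t in text.split() if t]
--     ngrams = []
--     for i in range(len(tokens)):
--         ngrams.append(tokens[i])  # unigram
--         if i < len(tokens) - 1 and n_grams >= 2:
--             ngrams.append(f"{tokens[i]}_{tokens[i+1]}")  # bigram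
--     return ngrams
-- ===== SOURCE B (Python) =====
-- PUNCT = frozenset(".,!?;:'\"()[]{}\u2013\u2014*/\\&%$#@+=<>~`|^_\u2014\u2013")
--
-- def custom_tokenize(text: str, n_grams: int = 2):
--     # Streaming tokenizer: one pass over the characters (with a sentinel space at the
--     # end), emitting each unigram and its following bigram the moment the next word
--     # boundary is reached -- no cleaned string and no intermediate token list.
--     out = []
--     prev = None
--     cur = []
--     for c in (text or "").lower() + " ":
--         if c in PUNCT or c.isspace():
--             if cur:
--                 w = ''.join(cur)
--                 cur = []
--                 if prev is not None:
--                     out.append(prev)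
--                     if n_grams >= 2:
--                         out.append(prev + "_" + w)
--                 prev = w
--         else:
--             cur.append(c)
--     if prev is not None:
--         out.append(prev)
--     return out
-- ===== Notes on version B (the rewrite author's own statement) =====
-- stated objective: alternative
-- what changed: A is a staged pipeline: 36 whole-text replace() passes to blank punctuation, then split() into a token list, then an indexed loop interleaving unigrams and bigrams; B is a single streaming pass over the characters (with a sentinel space) that keeps only (current word, previous word) state and emits each unigram/bigram at the word boundary, never materialising a cleaned string or token list.
import Mathlib
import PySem

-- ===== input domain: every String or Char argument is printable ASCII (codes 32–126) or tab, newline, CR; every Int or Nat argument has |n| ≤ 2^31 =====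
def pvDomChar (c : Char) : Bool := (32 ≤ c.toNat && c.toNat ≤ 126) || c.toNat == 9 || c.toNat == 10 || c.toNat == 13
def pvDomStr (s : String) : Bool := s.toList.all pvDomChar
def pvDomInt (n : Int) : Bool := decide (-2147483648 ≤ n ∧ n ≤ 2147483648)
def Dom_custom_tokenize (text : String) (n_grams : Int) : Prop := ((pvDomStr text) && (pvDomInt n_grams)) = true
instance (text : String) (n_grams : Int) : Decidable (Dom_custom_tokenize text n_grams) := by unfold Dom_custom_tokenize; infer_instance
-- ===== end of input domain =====

-- B replaces A's staged pipeline (36 whole-text replace() passes, split, indexed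
-- interleaving loop) by a single streaming pass over the characters that emits each
-- unigram/bigram at the word boundary, with no cleaned string and no token list.

-- ===== PORT A =====
def pvPunctA : List Char := ".,!?;:'\"()[]{}–—*/\\&%$#@+=<>~`|^_—–".toList

def pvCleanA (text : String) : String :=
  pvPunctA.foldl (fun t ch => PySem.Str.replace t (String.ofList [ch]) " ")
    (PySem.Str.lower (if text = "" then "" else text))

def pvTokensA (text : String) : List String :=
  (PySem.Str.split₀ (pvCleanA text)).filter (fun t => decide (t ≠ ""))

def custom_tokenize (text : String) (n_grams : Int) : List String :=
  (PySem.List.pyRange 0 (PySem.List.len (pvTokensA text)) 1).foldl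
    (fun acc i =>
      let acc := acc ++ [PySem.List.pyGetD (pvTokensA text) i ""]
      if i < PySem.List.len (pvTokensA text) - 1 ∧ n_grams ≥ 2 then
        acc ++ [PySem.List.pyGetD (pvTokensA text) i "" ++ "_" ++
                PySem.List.pyGetD (pvTokensA text) (i + 1) ""]
      else acc) []

-- ===== PORT B =====
def pvPunct : PySem.Set Char := PySem.Set.ofList ".,!?;:'\"()[]{}–—*/\\&%$#@+=<>~`|^_—–".toList

def pvSep (c : Char) : Bool := pvPunct.contains c || PySem.Chars.isspace c

-- one loop step of Source B: state = (out, prev, cur)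
def pvStep (n : Int) (st : List String × Option String × List Char) (c : Char) :
    List String × Option String × List Char :=
  if pvSep c then
    if st.2.2 = [] then st
    else
      let w := String.ofList st.2.2
      ((match st.2.1 with
        | none => st.1
        | some p => st.1 ++ [p] ++ (if n ≥ 2 then [p ++ "_" ++ w] else [])),
       some w, [])
  else (st.1, st.2.1, st.2.2 ++ [c])

-- the post-loop `if prev is not None: out.append(prev)`
def pvFinish (st : List String × Option String × List Char) : List String :=
  match st.2.1 with
  | none => st.1
  | some p => st.1 ++ [p]

def custom_tokenize_alt (text : String) (n_grams : Int) : List String :=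
  pvFinish
    (((PySem.Str.lower (if text = "" then "" else text)).toList ++ [' ']).foldl
      (pvStep n_grams) ([], none, []))

-- ===== PRECONDITION & SPEC =====
def Spec_custom_tokenize (text : String) (n_grams : Int) (out : List String) : Prop := out = custom_tokenize_alt text n_grams
instance (text : String) (n_grams : Int) (out : List String) : Decidable (Spec_custom_tokenize text n_grams out) := by unfold Spec_custom_tokenize; infer_instance

-- ===== CLAIM =====
def Claim_equal_custom_tokenize : Prop := ∀ (text : String) (n_grams : Int), Dom_custom_tokenize text n_grams → Spec_custom_tokenize text n_grams (custom_tokenize text n_grams)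

-- ===== LEMMAS AND PROOFS =====

-- proof-only helpers: the tokens a streaming pass will still produce, and the
-- output the stream will still emit, as functions of the remaining input
def pvToks : List Char → List Char → List (List Char)
  | [], cur => if cur = [] then [] else [cur]
  | c :: t, cur =>
      if pvSep c then (if cur = [] then pvToks t [] else cur :: pvToks t [])
      else pvToks t (cur ++ [c])

def pvRender (n : Int) : Option String → List (List Char) → List String
  | none, [] => []
  | some p, [] => [p]
  | none, t :: ts => pvRender n (some (String.ofList t)) ts
  | some p, t :: ts =>
      p :: ((if n ≥ 2 then [p ++ "_" ++ String.ofList t] else []) ++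
            pvRender n (some (String.ofList t)) ts)

def pvClean (c : Char) : Char := if c ∈ pvPunctA then ' ' else c

-- replace with a single-character pattern is a character map
lemma pv_replace_go_single (c : Char) : ∀ (fuel : Nat) (l acc : List Char), l.length ≤ fuel →
    PySem.Chars.replace.go [c] [' '] fuel l acc
      = acc.reverse ++ l.map (fun x => if x = c then ' ' else x)
  | 0, l, acc, h => by
      have hl : l = [] := List.eq_nil_of_length_eq_zero (Nat.le_zero.mp h)
      subst hl; simp [PySem.Chars.replace.go]
  | fuel + 1, [], acc, _ => by simp [PySem.Chars.replace.go]
  | fuel + 1, x :: t, acc, h => by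
      have ht : t.length ≤ fuel := by
        have := Nat.succ_le_succ_iff.mp (by simpa using h); exact this
      by_cases hx : x = c
      · simp [PySem.Chars.replace.go, List.isPrefixOf, hx,
              pv_replace_go_single c fuel t (' ' :: acc) ht]
      · simp [PySem.Chars.replace.go, List.isPrefixOf, hx,
              pv_replace_go_single c fuel t (x :: acc) ht, Ne.symm hx]

lemma pv_replace_single (c : Char) (cs : List Char) :
    PySem.Chars.replace cs [c] [' '] = cs.map (fun x => if x = c then ' ' else x) := by
  simpa [PySem.Chars.replace] using pv_replace_go_single c cs.length cs [] le_rfl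

-- folding single-char replaces over a list of characters is one map with a membership test
lemma pv_fold_replace (ps : List Char) (s : String) :
    (ps.foldl (fun t ch => PySem.Str.replace t (String.ofList [ch]) " ") s).toList
      = s.toList.map (fun x => if x ∈ ps then ' ' else x) := by
  induction ps generalizing s with
  | nil => simp
  | cons p ps ih =>
      simp only [List.foldl_cons]
      rw [ih]
      rw [show (PySem.Str.replace s (String.ofList [p]) " ").toList
            = s.toList.map (fun x => if x = p then ' ' else x) by
        have hb := PySem.Str.toList_replace s (String.ofList [p]) " "
        have hsp : (" " : String).toList = [' '] := by decide
        rw [hb, String.toList_ofList, hsp, pv_replace_single]]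
      rw [List.map_map]
      apply List.map_congr_left
      intro x _
      by_cases hx : x = p <;> by_cases hmem : x ∈ ps <;>
        simp [hx, hmem, Function.comp]

-- split() never produces an empty token
lemma pv_split0_go_ne_nil : ∀ (l cur : List Char) (acc : List (List Char)),
    (∀ t ∈ acc, t ≠ []) → ∀ t ∈ PySem.Chars.split₀.go l cur acc, t ≠ []
  | [], cur, acc, hacc => by
      by_cases hc : cur.isEmpty
      · simp only [PySem.Chars.split₀.go, hc, if_pos]
        intro t ht
        exact hacc t (List.mem_reverse.mp ht)
      · simp only [PySem.Chars.split₀.go, hc, Bool.false_eq_true]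
        intro t ht
        rcases List.mem_cons.mp (List.mem_reverse.mp ht) with h | h
        · subst h
          have hcur : cur ≠ [] := by
            intro hnil; rw [hnil] at hc; exact hc rfl
          simpa [List.reverse_eq_nil_iff] using hcur
        · exact hacc t h
  | c :: rest, cur, acc, hacc => by
      by_cases hs : PySem.Chars.isspace c
      · by_cases hc : cur.isEmpty
        · simpa [PySem.Chars.split₀.go, hs, hc] using
            pv_split0_go_ne_nil rest [] acc hacc
        · have hacc' : ∀ t ∈ cur.reverse :: acc, t ≠ [] := by
            intro t ht
            rcases List.mem_cons.mp ht with h | h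
            · subst h
              have hcur : cur ≠ [] := by
                intro hnil; rw [hnil] at hc; exact hc rfl
              simpa [List.reverse_eq_nil_iff] using hcur
            · exact hacc t h
          simpa [PySem.Chars.split₀.go, hs, hc] using
            pv_split0_go_ne_nil rest [] (cur.reverse :: acc) hacc' 
      · simpa [PySem.Chars.split₀.go, hs] using
          pv_split0_go_ne_nil rest (c :: cur) acc hacc

lemma pv_split0_ne_empty (s : String) : ∀ t ∈ PySem.Str.split₀ s, t ≠ "" := by
  intro t ht hteq
  have hmem : t.toList ∈ PySem.Chars.split₀ s.toList := by
    rw [← PySem.Str.split₀_map_toList]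
    exact List.mem_map_of_mem ht
  have h := pv_split0_go_ne_nil s.toList [] [] (by simp) t.toList
    (by simpa [PySem.Chars.split₀] using hmem)
  exact h (by simp [hteq])

-- B's separator test agrees with "whitespace after A's punctuation replacement"
lemma pv_isspace_space : PySem.Chars.isspace ' ' = true := by decide

lemma pv_sep_clean (c : Char) : PySem.Chars.isspace (pvClean c) = pvSep c := by
  unfold pvClean pvSep
  by_cases h : c ∈ pvPunctA
  · have hb : pvPunct.contains c = true := by
      have : c ∈ pvPunct := (PySem.Set.mem_ofList _ c).mpr h
      simpa [List.contains_eq_mem] using this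
    rw [hb, if_pos h, pv_isspace_space, Bool.true_or]
  · have hb : pvPunct.contains c = false := by
      have : c ∉ pvPunct := fun hmem => h ((PySem.Set.mem_ofList _ c).mp hmem)
      simpa [List.contains_eq_mem] using this
    rw [hb, if_neg h, Bool.false_or]

lemma pv_clean_of_not_sep (c : Char) (h : pvSep c = false) : pvClean c = c := by
  unfold pvClean
  by_cases hm : c ∈ pvPunctA
  · exfalso
    have hb : pvPunct.contains c = true := by
      have : c ∈ pvPunct := (PySem.Set.mem_ofList _ c).mpr hm
      simpa [List.contains_eq_mem] using this
    unfold pvSep at h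
    rw [hb] at h
    simp at h
  · simp [hm]

-- split₀ of the cleaned text = the streaming tokenizer's tokens
lemma pv_toks_split : ∀ (l cur : List Char) (acc : List (List Char)),
    PySem.Chars.split₀.go (l.map pvClean) cur.reverse acc = acc.reverse ++ pvToks l cur
  | [], cur, acc => by
      by_cases hc : cur = [] <;>
        simp [PySem.Chars.split₀.go, pvToks, hc]
  | c :: t, cur, acc => by
      by_cases hs : pvSep c
      · have hsp : PySem.Chars.isspace (pvClean c) = true := by rw [pv_sep_clean]; exact hs
        by_cases hc : cur = []
        · subst hc
          simpa [PySem.Chars.split₀.go, hsp, pvToks, hs] using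
            pv_toks_split t [] acc
        · have := pv_toks_split t [] (cur :: acc)
          simp only [List.reverse_nil] at this
          simp [PySem.Chars.split₀.go, hsp, pvToks, hs, hc,
                List.isEmpty_iff, this]
      · have hs' : pvSep c = false := by simpa using hs
        have hcl : pvClean c = c := pv_clean_of_not_sep c hs'
        have hsp : PySem.Chars.isspace c = false := by
          have h2 := pv_sep_clean c
          rw [hcl] at h2
          rw [h2]; exact hs'
        have ih := pv_toks_split t (cur ++ [c]) acc
        simp only [List.reverse_append, List.reverse_cons, List.reverse_nil,
                   List.nil_append, List.singleton_append] at ih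
        simp [PySem.Chars.split₀.go, List.map_cons, hcl, hsp, pvToks, hs', ih]

-- the streaming loop + final flush renders the remaining tokens
lemma pv_stream (n : Int) : ∀ (l : List Char) (out : List String) (prev : Option String) (cur : List Char),
    pvFinish ((l ++ [' ']).foldl (pvStep n) (out, prev, cur))
      = out ++ pvRender n prev (pvToks l cur)
  | [], out, prev, cur => by
      have hsp : pvSep ' ' = true := by decide
      by_cases hc : cur = []
      · cases prev <;> simp [pvStep, pvFinish, pvToks, pvRender, hsp, hc]
      · cases prev <;>
          simp [pvStep, pvFinish, pvToks, pvRender, hsp, hc]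
  | c :: t, out, prev, cur => by
      have hstep : ((c :: t) ++ [' ']).foldl (pvStep n) (out, prev, cur)
          = (t ++ [' ']).foldl (pvStep n) (pvStep n (out, prev, cur) c) := by
        simp
      rw [hstep]
      by_cases hs : pvSep c
      · by_cases hc : cur = []
        · subst hc
          rw [show pvStep n (out, prev, []) c = (out, prev, []) by simp [pvStep, hs]]
          rw [pv_stream n t out prev []]
          simp [pvToks, hs]
        · cases prev with
          | none =>
              rw [show pvStep n (out, none, cur) c = (out, some (String.ofList cur), []) by
                simp [pvStep, hs, hc]]
              rw [pv_stream n t out (some (String.ofList cur)) []]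
              simp [pvToks, hs, hc, pvRender]
          | some p =>
              rw [show pvStep n (out, some p, cur) c
                  = (out ++ [p] ++ (if n ≥ 2 then [p ++ "_" ++ String.ofList cur] else []),
                     some (String.ofList cur), []) by
                simp [pvStep, hs, hc]]
              rw [pv_stream n t
                (out ++ [p] ++ (if n ≥ 2 then [p ++ "_" ++ String.ofList cur] else []))
                (some (String.ofList cur)) []]
              simp [pvToks, hs, hc, pvRender]
      · have hs' : pvSep c = false := by simpa using hs
        rw [show pvStep n (out, prev, cur) c = (out, prev, cur ++ [c]) by simp [pvStep, hs']]
        rw [pv_stream n t out prev (cur ++ [c])]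
        simp [pvToks, hs']

-- rendering with n < 2 lists the tokens
lemma pv_render_lt (n : Int) (hn : ¬ n ≥ 2) :
    ∀ (tl : List (List Char)) (p : String),
      pvRender n (some p) tl = p :: tl.map String.ofList
  | [], p => by simp [pvRender]
  | t :: ts, p => by simp [pvRender, hn, pv_render_lt n hn ts]

-- rendering with n ≥ 2 is the zip-of-adjacent-pairs form plus the last token
lemma pv_render_ge (n : Int) (hn : n ≥ 2) :
    ∀ (tl : List (List Char)) (p : String),
      pvRender n (some p) tl
        = (((p :: tl.map String.ofList).zip (tl.map String.ofList)).flatMap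
            (fun q => [q.1, q.1 ++ "_" ++ q.2]))
          ++ [(p :: tl.map String.ofList).getLastD ""]
  | [], p => by simp [pvRender]
  | t :: ts, p => by
      have ih := pv_render_ge n hn ts (String.ofList t)
      simp only [pvRender, hn, if_pos, ih, List.map_cons, List.zip_cons_cons,
                 List.flatMap_cons, List.getLastD_cons]
      simp

-- the interleaved unigram/bigram list: index form = zip-of-adjacent-pairs form
lemma pv_interleave : ∀ (ts : List String), ts ≠ [] →
    (List.range ts.length).flatMap
      (fun k => ts.getD k "" ::
        (if k + 1 < ts.length then [ts.getD k "" ++ "_" ++ ts.getD (k + 1) ""] else []))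
    = (ts.zip ts.tail).flatMap (fun p => [p.1, p.1 ++ "_" ++ p.2]) ++ [ts.getLastD ""]
  | [], h => absurd rfl h
  | [x], _ => by simp
  | x :: y :: rest, _ => by
      have ih := pv_interleave (y :: rest) (by simp)
      rw [show List.range (x :: y :: rest).length
            = 0 :: List.map Nat.succ (List.range (y :: rest).length) from
          List.range_succ_eq_map (n := (y :: rest).length),
        List.flatMap_cons, List.flatMap_map]
      have hfun : (fun k => (x :: y :: rest).getD k.succ "" ::
            (if k.succ + 1 < (x :: y :: rest).length then
              [(x :: y :: rest).getD k.succ "" ++ "_" ++ (x :: y :: rest).getD (k.succ + 1) ""]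
             else []))
          = (fun k => (y :: rest).getD k "" ::
            (if k + 1 < (y :: rest).length then
              [(y :: rest).getD k "" ++ "_" ++ (y :: rest).getD (k + 1) ""]
             else [])) := by
        funext k
        have hiff : (k.succ + 1 < (x :: y :: rest).length) ↔ (k + 1 < (y :: rest).length) := by
          simp only [List.length_cons]
          omega
        rw [show (x :: y :: rest).getD k.succ "" = (y :: rest).getD k "" from rfl,
            show (x :: y :: rest).getD (k.succ + 1) "" = (y :: rest).getD (k + 1) "" from rfl,
            if_congr hiff rfl rfl]
      rw [hfun, ih]
      simp [List.zip_cons_cons]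

-- A's token list is the streaming tokenizer's, as strings
lemma pv_tokens_toks (text : String) :
    pvTokensA text
      = (pvToks (PySem.Str.lower (if text = "" then "" else text)).toList []).map String.ofList := by
  have hfil : pvTokensA text = PySem.Str.split₀ (pvCleanA text) := by
    unfold pvTokensA
    apply List.filter_eq_self.mpr
    intro t ht
    simpa using pv_split0_ne_empty (pvCleanA text) t ht
  have hclean : (pvCleanA text).toList
      = (PySem.Str.lower (if text = "" then "" else text)).toList.map pvClean := by
    unfold pvCleanA
    rw [pv_fold_replace]
    rfl
  have hsplit : (PySem.Str.split₀ (pvCleanA text)).map String.toList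
      = pvToks (PySem.Str.lower (if text = "" then "" else text)).toList [] := by
    rw [PySem.Str.split₀_map_toList, hclean]
    have := pv_toks_split (PySem.Str.lower (if text = "" then "" else text)).toList [] []
    simpa [PySem.Chars.split₀] using this
  rw [hfil, ← hsplit, List.map_map]
  rw [show String.ofList ∘ String.toList = id by funext s; simp]
  simp

-- ===== VERDICT (by name: the statement is the Claim_ definition above) =====

set_option maxRecDepth 8192 in
theorem custom_tokenize_spec : Claim_equal_custom_tokenize := by
  intro text n_grams _
  unfold Spec_custom_tokenize custom_tokenize custom_tokenize_alt
  have hB := pv_stream n_grams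
    (PySem.Str.lower (if text = "" then "" else text)).toList [] none []
  rw [hB, List.nil_append]
  have hts : pvTokensA text
      = (pvToks (PySem.Str.lower (if text = "" then "" else text)).toList []).map String.ofList :=
    pv_tokens_toks text
  generalize htl : pvToks (PySem.Str.lower (if text = "" then "" else text)).toList [] = tl at hts ⊢
  rw [hts]
  rw [PySem.List.foldl_congr_mem _ _
      (fun acc i => acc ++ (PySem.List.pyGetD (tl.map String.ofList) i "" ::
        (if i < PySem.List.len (tl.map String.ofList) - 1 ∧ n_grams ≥ 2 then
          [PySem.List.pyGetD (tl.map String.ofList) i "" ++ "_" ++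
           PySem.List.pyGetD (tl.map String.ofList) (i + 1) ""]
         else []))) _
      (by intro acc i _
          split_ifs with h1 <;> simp_all)]
  rw [PySem.List.foldl_append_eq_flatMap, List.nil_append,
      PySem.List.len_eq, PySem.List.pyRange_zero_nat, List.flatMap_map]
  by_cases hn : n_grams ≥ 2
  · have hfun : (fun (k : Nat) => PySem.List.pyGetD (tl.map String.ofList) (↑k) "" ::
          (if (↑k : Int) < ↑(tl.map String.ofList).length - 1 ∧ n_grams ≥ 2 then
            [PySem.List.pyGetD (tl.map String.ofList) (↑k) "" ++ "_" ++
             PySem.List.pyGetD (tl.map String.ofList) ((↑k : Int) + 1) ""]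
           else []))
        = (fun (k : Nat) => (tl.map String.ofList).getD k "" ::
          (if k + 1 < (tl.map String.ofList).length then
            [(tl.map String.ofList).getD k "" ++ "_" ++ (tl.map String.ofList).getD (k + 1) ""]
           else [])) := by
      funext k
      have hiff : ((↑k : Int) < ↑(tl.map String.ofList).length - 1 ∧ n_grams ≥ 2)
          ↔ (k + 1 < (tl.map String.ofList).length) := by
        constructor
        · intro ⟨h1, _⟩; omega
        · intro h1; exact ⟨by omega, hn⟩
      have hcast : ((↑k : Int) + 1) = ((↑(k + 1) : Int)) := by push_cast; ring
      rw [hcast, PySem.List.pyGetD_natCast, PySem.List.pyGetD_natCast,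
          if_congr hiff rfl rfl]
    rw [hfun]
    cases tl with
    | nil => simp [pvRender]
    | cons t ts =>
        rw [pv_interleave ((t :: ts).map String.ofList) (by simp)]
        simp only [pvRender]
        rw [pv_render_ge n_grams hn ts (String.ofList t)]
        simp
  · have hfun : (fun (k : Nat) => PySem.List.pyGetD (tl.map String.ofList) (↑k) "" ::
          (if (↑k : Int) < ↑(tl.map String.ofList).length - 1 ∧ n_grams ≥ 2 then
            [PySem.List.pyGetD (tl.map String.ofList) (↑k) "" ++ "_" ++
             PySem.List.pyGetD (tl.map String.ofList) ((↑k : Int) + 1) ""]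
           else []))
        = (fun (k : Nat) => [(tl.map String.ofList).getD k ""]) := by
      funext k
      simp [hn, PySem.List.pyGetD_natCast]
    rw [hfun]
    cases tl with
    | nil => simp [pvRender]
    | cons t ts =>
        simp only [pvRender]
        rw [pv_render_lt n_grams hn ts (String.ofList t)]
        rw [← List.map_eq_flatMap]
        apply List.ext_getElem (by simp)
        intro i h1 h2
        simp [List.getD_eq_getElem?_getD, List.getElem?_eq_getElem h2]
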